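-- pv_equiv track=rewrite | github.com/ghazalbigdeli/Advent-of-Code-2020 | Day10/Day10.py | numArrangements
-- ===== SOURCE A (Python) =====
-- from itertools import combinations
--
-- def calculateDiff(input):
--     diff = []
--     for i in range(len(input) - 1):
--         diff.append(input[i + 1] - input[i])
--     return diff
--
-- def numArrangements(sub):
--     if(len(sub) == 1):
--         return 1
--
--     count = 0
--     for i in range(2, len(sub) + 1):
--         comb = combinations(sub, i)
--         for j in comb:
--             diff = calculateDiff(j)
--             if (j[0] == sub[0] and j[-1] == sub[-1] and (all(x <= 3 for x in diff))):
--                 count += 1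
--
--     return count
-- ===== SOURCE B (Python) =====
-- def numArrangements(sub):
--     # Backward DP over positions: ways[i] = number of chain-subsequences (diffs <= 3)
--     # starting at position i and ending at a position whose value equals sub[-1].
--     if len(sub) == 1:
--         return 1
--     if not sub:
--         return 0
--     a, b = sub[0], sub[-1]
--     suffix = []  # (value, ways) for the elements after the current one, in order
--     total = 0
--     for x in reversed(sub):
--         w = (1 if x == b else 0) + sum(h for y, h in suffix if y - x <= 3)
--         if x == a:
--             total += w - (1 if x == b else 0)
--         suffix.insert(0, (x, w))
--     return total
-- ===== Notes on version B (the rewrite author's own statement) =====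
-- stated objective: faster
-- what changed: Replaces A's enumeration of every combination of every length (testing each for the endpoint and diff<=3 conditions) with a single right-to-left dynamic programme that counts, per position, the chain-subsequences starting there and ending at a value equal to sub[-1].
import Mathlib
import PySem

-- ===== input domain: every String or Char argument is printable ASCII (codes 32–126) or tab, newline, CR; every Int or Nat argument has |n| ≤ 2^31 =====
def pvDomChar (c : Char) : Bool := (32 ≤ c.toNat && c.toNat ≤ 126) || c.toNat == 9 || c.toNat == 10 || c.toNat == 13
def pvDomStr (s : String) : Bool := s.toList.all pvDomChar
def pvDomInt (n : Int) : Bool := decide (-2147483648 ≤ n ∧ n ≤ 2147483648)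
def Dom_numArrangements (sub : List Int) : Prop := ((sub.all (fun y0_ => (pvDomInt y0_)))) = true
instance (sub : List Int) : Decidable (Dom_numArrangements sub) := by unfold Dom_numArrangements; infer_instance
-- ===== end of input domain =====

-- B replaces A's enumeration of all combinations of every length by a right-to-left
-- dynamic programme over positions (objective: faster, exponential → quadratic).

-- ===== PORT A =====
-- helper calculateDiff: the range loop appending input[i+1]-input[i]; every index
-- accessed is in range, so pyGetD with default 0 is exact here.
def calculateDiff (input : List Int) : List Int :=
  (PySem.List.pyRange 0 ((input.length : Int) - 1) 1).foldl
    (fun diff i => diff ++ [PySem.List.pyGetD input (i + 1) 0 - PySem.List.pyGetD input i 0]) []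

-- itertools.combinations(sub, k): hand port, tuples in itertools' order
-- (elements taken at strictly increasing positions).
def combos : Nat → List Int → List (List Int)
  | 0, _ => [[]]
  | _ + 1, [] => []
  | k + 1, x :: xs => ((combos k xs).map (fun t => x :: t)) ++ combos (k + 1) xs
termination_by k l => (k, l.length)

-- A's temporary `diff = calculateDiff(j)` is written inline in the condition.
-- i ≥ 2 on every loop iteration, so i.toNat is exact for combinations(sub, i).
def numArrangements (sub : List Int) : Int :=
  if sub.length = 1 then 1
  else
    (PySem.List.pyRange 2 ((sub.length : Int) + 1) 1).foldl (fun count i =>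
      (combos i.toNat sub).foldl (fun count j =>
        if PySem.List.pyGet? j 0 = PySem.List.pyGet? sub 0 ∧
           PySem.List.pyGet? j (-1) = PySem.List.pyGet? sub (-1) ∧
           (calculateDiff j).all (fun x => decide (x ≤ 3))
        then count + 1 else count) count) 0

-- ===== PORT B =====
-- B's reversed loop: recursion from the right; state = (suffix pair list, total).
def altGo (a b : Int) : List Int → List (Int × Int) × Int
  | [] => ([], 0)
  | x :: xs =>
    let r := altGo a b xs
    let w : Int := (if x = b then 1 else 0) +
      ((r.1.filter (fun p => decide (p.1 - x ≤ 3))).map Prod.snd).sum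
    ((x, w) :: r.1, r.2 + (if x = a then w - (if x = b then 1 else 0) else 0))

def numArrangements_alt (sub : List Int) : Int :=
  if sub.length = 1 then 1
  else if sub = [] then 0
  else
    -- sub[0] / sub[-1] on the (nonempty) list; the defaults are unreachable
    (altGo (sub.headD 0) (sub.getLastD 0) sub).2

-- ===== PRECONDITION & SPEC =====
def Spec_numArrangements (sub : List Int) (out : Int) : Prop := out = numArrangements_alt sub
instance (sub : List Int) (out : Int) : Decidable (Spec_numArrangements sub out) := by unfold Spec_numArrangements; infer_instance

-- ===== CLAIM (what is proved, stated in full; the proofs are below) =====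
def Claim_equal_numArrangements : Prop := ∀ (sub : List Int), Dom_numArrangements sub → Spec_numArrangements sub (numArrangements sub)

-- ===== LEMMAS AND PROOFS =====

-- the common specification layer: sublists, the chain condition, the predicate
def mySub : List Int → List (List Int)
  | [] => [[]]
  | x :: xs => ((mySub xs).map (fun t => x :: t)) ++ mySub xs

def chainB : List Int → Bool
  | [] => true
  | [_] => true
  | x :: y :: r => decide (y - x ≤ 3) && chainB (y :: r)

def predP (a b : Int) (t : List Int) : Bool :=
  (t.head? == some a) && (t.getLast? == some b) && chainB t

-- -------- calculateDiff --------
theorem calcD (input : List Int) :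
    calculateDiff input =
      (List.range (input.length - 1)).map
        (fun k => input.getD (k + 1) 0 - input.getD k 0) := by
  unfold calculateDiff
  rw [PySem.List.pyRange_one, PySem.List.foldl_append_singleton_eq_map]
  have h : ((input.length : Int) - 1 - 0).toNat = input.length - 1 := by omega
  rw [h, List.map_map]
  apply List.map_congr_left
  intro k _
  have e1 : (0 : Int) + (k : Int) + 1 = ((k + 1 : Nat) : Int) := by push_cast; ring
  have e2 : (0 : Int) + (k : Int) = ((k : Nat) : Int) := by push_cast; ring
  rw [Function.comp, e1, e2, PySem.List.pyGetD_natCast, PySem.List.pyGetD_natCast]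

theorem calcD_nil : calculateDiff [] = [] := by simp [calcD]

theorem calcD_single (x : Int) : calculateDiff [x] = [] := by simp [calcD]

theorem calcD_cons (x y : Int) (r : List Int) :
    calculateDiff (x :: y :: r) = (y - x) :: calculateDiff (y :: r) := by
  rw [calcD, calcD]
  have h1 : (x :: y :: r).length - 1 = ((y :: r).length - 1) + 1 := by simp
  rw [h1, List.range_succ_eq_map, List.map_cons, List.map_map]
  constructor

theorem all_calcD : ∀ t : List Int,
    (calculateDiff t).all (fun x => decide (x ≤ 3)) = chainB t
  | [] => by simp [calcD_nil, chainB]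
  | [x] => by simp [calcD_single, chainB]
  | x :: y :: r => by
      rw [calcD_cons]
      simp [chainB, all_calcD (y :: r)]

-- -------- counting helpers --------
theorem foldl_count {α : Type} (p : α → Prop) [DecidablePred p] (l : List α) (c : Int) :
    l.foldl (fun c j => if p j then c + 1 else c) c
      = c + ((l.countP (fun j => decide (p j)) : Nat) : Int) := by
  induction l generalizing c with
  | nil => simp
  | cons hd tl ih =>
      simp only [List.foldl_cons, List.countP_cons, ih]
      by_cases h : p hd <;> simp [h] <;> push_cast <;> ring

theorem mem_mySub_length : ∀ (xs : List Int), ∀ t ∈ mySub xs, t.length ≤ xs.length := by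
  intro xs
  induction xs with
  | nil => intro t ht; simp [mySub] at ht; simp [ht]
  | cons x xs ih =>
      intro t ht
      simp only [mySub, List.mem_append, List.mem_map] at ht
      rcases ht with ⟨u, hu, rfl⟩ | ht
      · simpa using ih u hu
      · have := ih t ht; simp; omega

theorem combos_eq_filter : ∀ (k : Nat) (xs : List Int),
    combos k xs = (mySub xs).filter (fun t => decide (t.length = k))
  | 0, xs => by
      induction xs with
      | nil => simp [combos, mySub]
      | cons x xs ih =>
          simp only [mySub, List.filter_append, List.filter_map]
          rw [combos, ← ih]
          simp [combos, List.filter_eq_nil_iff]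
  | k + 1, [] => by simp [combos, mySub]
  | k + 1, x :: xs => by
      rw [combos, combos_eq_filter k xs, combos_eq_filter (k + 1) xs]
      simp only [mySub, List.filter_append, List.filter_map]
      congr 1
      congr 1
      apply List.filter_congr
      intro t _
      simp
termination_by k xs => (k, xs.length)

theorem countP_split (l : List (List Int)) (p : List Int → Bool) (m : Nat) :
    l.countP (fun t => p t && (decide (2 ≤ t.length) && decide (t.length < m + 2)))
      + l.countP (fun t => p t && decide (t.length = m + 2))
      = l.countP (fun t => p t && (decide (2 ≤ t.length) && decide (t.length < m + 3))) := by
  induction l with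
  | nil => simp
  | cons hd tl ih =>
      by_cases hp : p hd = true
      · simp only [List.countP_cons, hp, Bool.true_and]
        split_ifs <;>
          simp only [Bool.and_eq_true, decide_eq_true_eq] at * <;> omega
      · simp [hp, ih]

theorem sum_counts (xs : List Int) (p : List Int → Bool) : ∀ (m : Nat),
    (((List.range m).map
        (fun k => ((combos (k + 2) xs).countP p : Int))).sum)
      = (((mySub xs).countP (fun t => p t && (decide (2 ≤ t.length) && decide (t.length < m + 2))) : Nat) : Int) := by
  intro m
  induction m with
  | zero =>
      simp only [List.range_zero, List.map_nil, List.sum_nil]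
      have hz : (mySub xs).countP (fun t => p t && (decide (2 ≤ t.length) && decide (t.length < 0 + 2))) = 0 := by
        rw [List.countP_eq_zero]
        intro t _ h
        simp only [Bool.and_eq_true, decide_eq_true_eq] at h
        omega
      rw [hz]
      simp
  | succ m ih =>
      rw [List.range_succ, List.map_append, List.sum_append, ih]
      simp only [List.map_cons, List.map_nil, List.sum_cons, List.sum_nil]
      rw [combos_eq_filter (m + 2) xs, List.countP_filter]
      have h3 := countP_split (mySub xs) p m
      push_cast [← h3]
      ring

-- -------- A's value as a count over sublists --------
theorem A_as_count (x y : Int) (r : List Int) (b : Int)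
    (hb : (x :: y :: r).getLast? = some b) :
    numArrangements (x :: y :: r)
      = (((mySub (x :: y :: r)).countP
           (fun t => decide (2 ≤ t.length) && predP x b t) : Nat) : Int) := by
  have hlen1 : ¬ (x :: y :: r).length = 1 := by simp
  have hget0 : PySem.List.pyGet? (x :: y :: r) 0 = some x := by
    simp [PySem.List.pyGet?_zero]
  have hgetm1 : PySem.List.pyGet? (x :: y :: r) (-1) = some b := by
    rw [PySem.List.pyGet?_neg_one]; exact hb
  -- the inner fold is a countP
  have inner : ∀ (l : List (List Int)) (c : Int),
      l.foldl (fun count j =>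
        if PySem.List.pyGet? j 0 = PySem.List.pyGet? (x :: y :: r) 0 ∧
           PySem.List.pyGet? j (-1) = PySem.List.pyGet? (x :: y :: r) (-1) ∧
           (calculateDiff j).all (fun v => decide (v ≤ 3))
        then count + 1 else count) c
      = c + ((l.countP (predP x b) : Nat) : Int) := by
    intro l c
    rw [foldl_count (fun j => PySem.List.pyGet? j 0 = PySem.List.pyGet? (x :: y :: r) 0 ∧
           PySem.List.pyGet? j (-1) = PySem.List.pyGet? (x :: y :: r) (-1) ∧
           (calculateDiff j).all (fun v => decide (v ≤ 3)) = true) l c]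
    congr 2
    apply List.countP_congr
    intro t _
    rw [hget0, hgetm1]
    simp [predP, all_calcD t, PySem.List.pyGet?_zero, PySem.List.pyGet?_neg_one,
      List.head?_eq_getElem?, and_assoc]
  unfold numArrangements
  rw [if_neg hlen1, PySem.List.pyRange_one]
  have hfold : ∀ (ks : List Int) (c : Int),
      ks.foldl (fun count i =>
        (combos i.toNat (x :: y :: r)).foldl (fun count j =>
          if PySem.List.pyGet? j 0 = PySem.List.pyGet? (x :: y :: r) 0 ∧
             PySem.List.pyGet? j (-1) = PySem.List.pyGet? (x :: y :: r) (-1) ∧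
             (calculateDiff j).all (fun v => decide (v ≤ 3))
          then count + 1 else count) count) c
      = c + (ks.map (fun i => (((combos i.toNat (x :: y :: r)).countP (predP x b) : Nat) : Int))).sum := by
    intro ks
    induction ks with
    | nil => simp
    | cons k ks ih => intro c; rw [List.foldl_cons, inner, ih]; simp; ring
  rw [hfold, List.map_map]
  have hm : (((x :: y :: r).length : Int) + 1 - 2).toNat = (x :: y :: r).length - 1 := by
    omega
  rw [hm]
  have hcomp : ∀ k ∈ List.range ((x :: y :: r).length - 1),
      ((fun i => (((combos i.toNat (x :: y :: r)).countP (predP x b) : Nat) : Int)) ∘ (fun k : Nat => (2 : Int) + k)) k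
        = (((combos (k + 2) (x :: y :: r)).countP (predP x b) : Nat) : Int) := by
    intro k _
    simp only [Function.comp]
    congr 3
    omega
  rw [List.map_congr_left hcomp, sum_counts (x :: y :: r) (predP x b) ((x :: y :: r).length - 1)]
  have hlast : ∀ t ∈ mySub (x :: y :: r),
      ((predP x b t && (decide (2 ≤ t.length) && decide (t.length < (x :: y :: r).length - 1 + 2))) = true
        ↔ (decide (2 ≤ t.length) && predP x b t) = true) := by
    intro t ht
    have hle := mem_mySub_length _ t ht
    simp only [Bool.and_eq_true, decide_eq_true_eq]
    constructor
    · rintro ⟨hp, h2', _⟩; exact ⟨h2', hp⟩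
    · rintro ⟨h2', hp⟩; exact ⟨hp, h2', by omega⟩
  rw [List.countP_congr hlast]
  simp

-- -------- B's value as a count over sublists --------
def Frec (b : Int) : Int → List Int → Int
  | x, [] => if x = b then 1 else 0
  | x, y :: ys => (if y - x ≤ 3 then Frec b y ys else 0) + Frec b x ys

def specSuf (b : Int) : List Int → List (Int × Int)
  | [] => []
  | y :: ys => (y, Frec b y ys) :: specSuf b ys

def Srec (a b : Int) : List Int → Int
  | [] => 0
  | x :: xs => Srec a b xs + (if x = a then Frec b x xs - (if x = b then 1 else 0) else 0)

theorem w_eq_Frec (b : Int) : ∀ (xs : List Int) (x : Int),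
    (if x = b then (1 : Int) else 0) +
      (((specSuf b xs).filter (fun p => decide (p.1 - x ≤ 3))).map Prod.snd).sum
      = Frec b x xs := by
  intro xs
  induction xs with
  | nil => intro x; simp [specSuf, Frec]
  | cons y ys ih =>
      intro x
      simp only [specSuf, List.filter_cons]
      by_cases h : y - x ≤ 3
      · simp only [h, decide_true, if_true, List.map_cons, List.sum_cons]
        rw [Frec, if_pos h, ← ih x]
        ring
      · simp only [h, decide_false]
        rw [Frec, if_neg h, ← ih x]
        simp

theorem altGo_eq (a b : Int) : ∀ (xs : List Int),
    altGo a b xs = (specSuf b xs, Srec a b xs) := by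
  intro xs
  induction xs with
  | nil => simp [altGo, specSuf, Srec]
  | cons x xs ih =>
      simp only [altGo, ih]
      rw [w_eq_Frec b xs x]
      simp only [specSuf, Srec]

theorem Frec_as_count (b : Int) : ∀ (xs : List Int) (x : Int),
    Frec b x xs
      = (((mySub xs).countP
          (fun t => chainB (x :: t) && ((x :: t).getLast? == some b)) : Nat) : Int) := by
  intro xs
  induction xs with
  | nil =>
      intro x
      simp [mySub, Frec, chainB, List.countP_cons]
  | cons y ys ih =>
      intro x
      simp only [mySub, List.countP_append, List.countP_map]
      have hmap : ((fun t => chainB (x :: t) && ((x :: t).getLast? == some b)) ∘ (fun t => y :: t))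
          = fun t => (decide (y - x ≤ 3) && chainB (y :: t)) && ((y :: t).getLast? == some b) := by
        funext t
        simp [Function.comp, chainB, List.getLast?_cons_cons, Bool.and_assoc]
      rw [hmap, Frec]
      by_cases h : y - x ≤ 3
      · rw [if_pos h, ih y, ih x]
        have : (fun t => (decide (y - x ≤ 3) && chainB (y :: t)) && ((y :: t).getLast? == some b))
            = fun t => chainB (y :: t) && ((y :: t).getLast? == some b) := by
          funext t; simp [h]
        rw [this]
        push_cast
        ring
      · rw [if_neg h, ih x]
        have : (mySub ys).countP (fun t => (decide (y - x ≤ 3) && chainB (y :: t)) && ((y :: t).getLast? == some b)) = 0 := by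
          rw [List.countP_eq_zero]
          intro t _
          simp [h]
        rw [this]
        simp

theorem countP_nonempty (xs : List Int) (q : List Int → Bool) :
    ((mySub xs).countP q : Int)
      = ((mySub xs).countP (fun t => !t.isEmpty && q t) : Int) + (if q [] = true then 1 else 0) := by
  induction xs with
  | nil =>
      simp only [mySub, List.countP_cons, List.countP_nil]
      by_cases h : q [] = true <;> simp [h]
  | cons x xs ih =>
      simp only [mySub, List.countP_append, List.countP_map]
      have h1 : (q ∘ fun t => x :: t) = ((fun t => !t.isEmpty && q t) ∘ fun t => x :: t) := by
        funext t; simp [Function.comp]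
      rw [h1]
      push_cast
      push_cast at ih
      omega

theorem Srec_as_count (a b : Int) : ∀ (xs : List Int),
    Srec a b xs
      = (((mySub xs).countP (fun t => decide (2 ≤ t.length) && predP a b t) : Nat) : Int) := by
  intro xs
  induction xs with
  | nil =>
      simp [mySub, Srec, predP]
  | cons x xs ih =>
      simp only [mySub, List.countP_append, List.countP_map]
      rw [Srec, ih]
      by_cases hx : x = a
      · subst hx
        have hc : ∀ t ∈ mySub xs,
            (((fun t => decide (2 ≤ t.length) && predP x b t) ∘ (fun t => x :: t)) t = true
              ↔ (fun t => !t.isEmpty && (chainB (x :: t) && ((x :: t).getLast? == some b))) t = true) := by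
          intro t _
          cases t with
          | nil => simp [Function.comp, predP]
          | cons u us =>
              simp only [Function.comp, predP, List.head?_cons, List.length_cons, Bool.and_eq_true,
                decide_eq_true_eq, beq_iff_eq, Bool.not_eq_eq_eq_not, Bool.not_true,
                List.isEmpty_eq_false_iff]
              constructor
              · rintro ⟨-, ⟨-, h3⟩, h4⟩
                exact ⟨by simp, h4, h3⟩
              · rintro ⟨-, h4, h3⟩
                exact ⟨by omega, ⟨trivial, h3⟩, h4⟩
        rw [List.countP_congr hc, Frec_as_count b xs x]
        have hne := countP_nonempty xs (fun t => chainB (x :: t) && ((x :: t).getLast? == some b))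
        have hne' : (((mySub xs).countP (fun t => chainB (x :: t) && ((x :: t).getLast? == some b)) : Nat) : Int)
            = (((mySub xs).countP (fun t => !t.isEmpty && (chainB (x :: t) && ((x :: t).getLast? == some b))) : Nat) : Int)
              + (if x = b then (1 : Int) else 0) := by
          rw [hne]
          congr 1
          by_cases hxb : x = b <;> simp [hxb, chainB]
        rw [if_pos (rfl : x = x)]
        push_cast
        linarith [hne']
      · have hc : ∀ t ∈ mySub xs,
            (((fun t => decide (2 ≤ t.length) && predP a b t) ∘ (fun t => x :: t)) t = true
              ↔ (fun _ : List Int => false) t = true) := by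
          intro t _
          simp only [Function.comp, predP, List.head?_cons, Bool.and_eq_true, beq_iff_eq,
            Option.some.injEq]
          constructor
          · rintro ⟨-, ⟨h1, -⟩, -⟩; exact absurd h1 hx
          · intro h; cases h
        rw [List.countP_congr hc]
        simp [hx]

-- -------- assembly --------
theorem numArrangements_eq (sub : List Int) :
    numArrangements sub = numArrangements_alt sub := by
  match sub with
  | [] => simp [numArrangements, numArrangements_alt]
  | [x] => simp [numArrangements, numArrangements_alt]
  | x :: y :: r =>
      have hbl : (x :: y :: r).getLast? = some ((x :: y :: r).getLast (by simp)) := by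
        rw [List.getLast?_eq_some_getLast]
      rw [A_as_count x y r _ hbl]
      unfold numArrangements_alt
      rw [if_neg (by simp), if_neg (by simp)]
      have h1 : (x :: y :: r).headD 0 = x := rfl
      have h2 : (x :: y :: r).getLastD 0 = (x :: y :: r).getLast (by simp) := by
        rw [List.getLastD_eq_getLast?, hbl]
        rfl
      rw [h1, h2, altGo_eq, Srec_as_count]

-- ===== VERDICT (by name: the statement is the Claim_ definition above) =====
theorem numArrangements_spec : Claim_equal_numArrangements := by
  intro sub _
  exact numArrangements_eq sub
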